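-- pv_equiv track=rewrite | github.com/eugeniemarescaux/gecco2021 | script-popt-computation.py | dist_from_diff_normal
-- ===== SOURCE A (Python) =====
-- def dist_from_diff_normal(delta):
--     xopt = []
--     xopti=0
--     for d in delta[:-1]:
--         xopti += d
--         xopt.append(xopti)
--     xopt.append(1-delta[-1])
--     return xopt
-- ===== SOURCE B (Python) =====
-- def dist_from_diff_normal(delta):
--     return [sum(delta[:i + 1]) for i in range(len(delta) - 1)] + [1 - delta[-1]]
-- ===== Notes on version B (the rewrite author's own statement) =====
-- stated objective: alternative
-- what changed: B builds each non-last entry as an independent prefix sum sum(delta[:i+1]) in a comprehension and appends 1 minus the last element, instead of A's single pass with a running accumulator and repeated appends.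
import Mathlib
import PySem

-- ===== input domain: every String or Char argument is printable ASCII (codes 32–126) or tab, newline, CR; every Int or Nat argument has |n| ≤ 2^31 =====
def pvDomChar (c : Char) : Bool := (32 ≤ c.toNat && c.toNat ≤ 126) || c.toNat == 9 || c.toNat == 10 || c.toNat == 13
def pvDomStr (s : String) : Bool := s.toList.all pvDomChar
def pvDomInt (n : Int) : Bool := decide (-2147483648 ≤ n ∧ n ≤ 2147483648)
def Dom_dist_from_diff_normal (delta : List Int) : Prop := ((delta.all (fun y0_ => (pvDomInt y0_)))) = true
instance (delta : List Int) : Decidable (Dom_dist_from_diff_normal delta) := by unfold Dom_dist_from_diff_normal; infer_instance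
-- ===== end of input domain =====

-- B replaces A's running-accumulator loop by independent per-index prefix-sum recomputation (alternative decomposition, not faster).
-- ===== PORT A =====
def dist_from_diff_normal (delta : List Int) : List Int :=
  -- for d in delta[:-1]: xopti += d; xopt.append(xopti)
  ((PySem.List.slice delta none (some (-1))).foldl
      (fun (st : List Int × Int) d => (st.1 ++ [st.2 + d], st.2 + d)) ([], 0)).1
    -- append 1 minus the last element — total under Pre_ (delta nonempty)
    ++ [1 - PySem.List.pyGetD delta (-1) 0]

-- ===== PORT B =====
def dist_from_diff_normal_alt (delta : List Int) : List Int :=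
  -- comprehension of independent prefix sums, then 1 minus the last element
  ((PySem.List.pyRange 0 (PySem.List.len delta - 1) 1).map
      (fun i => (PySem.List.slice delta none (some (i + 1))).sum))
    ++ [1 - PySem.List.pyGetD delta (-1) 0]

-- ===== PRECONDITION & SPEC =====
-- Pre_ excludes only the empty list, where Python A (and B) raise IndexError reading the last element.
def Pre_dist_from_diff_normal (delta : List Int) : Prop := delta ≠ []
instance (delta : List Int) : Decidable (Pre_dist_from_diff_normal delta) := by unfold Pre_dist_from_diff_normal; infer_instance
def pvWitness_dist_from_diff_normal : List Int := [2, -1, 3]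
def Spec_dist_from_diff_normal (delta : List Int) (out : List Int) : Prop := out = dist_from_diff_normal_alt delta
instance (delta : List Int) (out : List Int) : Decidable (Spec_dist_from_diff_normal delta out) := by unfold Spec_dist_from_diff_normal; infer_instance

-- ===== CLAIM (what is proved, stated in full; the proofs are below) =====
def Claim_equal_dist_from_diff_normal : Prop := ∀ (delta : List Int), Dom_dist_from_diff_normal delta → Pre_dist_from_diff_normal delta → Spec_dist_from_diff_normal delta (dist_from_diff_normal delta)

-- ===== LEMMAS AND PROOFS =====
-- A's loop produces the prefix sums of the traversed list, offset by the accumulator.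
theorem foldl_prefix_sums (l : List Int) (acc : List Int) (s : Int) :
    (l.foldl (fun (st : List Int × Int) d => (st.1 ++ [st.2 + d], st.2 + d)) (acc, s)).1
      = acc ++ (List.range l.length).map (fun k => s + (l.take (k + 1)).sum) := by
  induction l generalizing acc s with
  | nil => simp
  | cons d l ih =>
    simp only [List.foldl_cons, List.length_cons, List.range_succ_eq_map, List.map_cons,
      List.map_map, ih]
    simp [Function.comp, List.take_succ_cons, add_assoc]

-- B's per-index sums over the whole list agree with prefix sums of dropLast.
theorem take_dropLast_sum (delta : List Int) (k : Nat) (hk : k < delta.dropLast.length) :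
    (delta.take (k + 1)).sum = (delta.dropLast.take (k + 1)).sum := by
  rw [List.dropLast_eq_take, List.take_take,
    Nat.min_eq_left (by simp only [List.length_dropLast] at hk; omega)]

-- ===== VERDICT (by name: the statement is the Claim_ definition above) =====
theorem dist_from_diff_normal_spec : Claim_equal_dist_from_diff_normal := by
  intro delta _ _
  unfold Spec_dist_from_diff_normal dist_from_diff_normal dist_from_diff_normal_alt
  rw [PySem.List.slice_to_neg_one, foldl_prefix_sums]
  congr 1
  rw [PySem.List.pyRange_one]
  simp only [PySem.List.len_eq, List.nil_append, List.map_map]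
  have hlen : ((delta.length : Int) - 1 - 0).toNat = delta.dropLast.length := by
    simp only [List.length_dropLast]; omega
  rw [hlen]
  refine List.map_congr_left ?_
  intro k hk
  simp only [List.mem_range] at hk
  have hcast : (k : Int) + 1 = ((k + 1 : Nat) : Int) := by push_cast; ring
  simp only [Function.comp, zero_add, hcast, PySem.List.slice_to_natCast]
  exact (take_dropLast_sum delta k hk).symm
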